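-- pv_equiv track=rewrite | github.com/Siddardth7/job-pipeline | pipeline/distribute_feed.py | is_applied
-- ===== SOURCE A (Python) =====
-- def is_applied(job: dict, applied_set: set) -> bool:
--     """
--     Return True if this job matches an entry in applied_set.
--
--     Matching rules:
--     - company_name and job_title are always required.
--     - If both the feed job and the applied entry have a location, they must match.
--     - If either side has an empty location, fall back to a 2-field (company+title) match.
--       This handles inconsistent location data across different scrapers.
--     """
--     company  = (job.get("company_name") or "").lower().strip()
--     location = (job.get("location")     or "").lower().strip()
--     title    = (job.get("job_title")    or "").lower().strip()
--
--     if not company or not title: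
--         return False
--
--     # Exact 3-field match (fast path)
--     if (company, location, title) in applied_set:
--         return True
--
--     # Location-tolerant fallback:
--     # Trigger only when at least one side has an empty location.
--     if not location:
--         # Feed job has no location — check company+title across all applied entries
--         return any(c == company and t == title for (c, l, t) in applied_set)
--     else:
--         # Feed job has a location — check if applied entry had empty location for same job
--         return (company, "", title) in applied_set
-- ===== SOURCE B (Python) =====
-- def _matches(entry, company, location, title):
--     c, l, t = entry
--     if c != company or t != title:
--         return False
--     # locations must agree unless either side is empty
--     return l == location or l == "" or location == ""
--
-- def is_applied(job: dict, applied_set: set) -> bool: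
--     company  = (job.get("company_name") or "").lower().strip()
--     location = (job.get("location")     or "").lower().strip()
--     title    = (job.get("job_title")    or "").lower().strip()
--
--     if not company or not title:
--         return False
--
--     # One linear scan with early exit, applying a single uniform rule per entry.
--     for entry in applied_set:
--         if _matches(entry, company, location, title):
--             return True
--     return False
-- ===== Notes on version B (the rewrite author's own statement) =====
-- stated objective: simpler
-- what changed: Replaced A's exact-match set lookup plus two branched fallback checks (empty vs non-empty feed location) with one early-exit linear scan applying a single uniform per-entry matching predicate via a helper.
import Mathlib
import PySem

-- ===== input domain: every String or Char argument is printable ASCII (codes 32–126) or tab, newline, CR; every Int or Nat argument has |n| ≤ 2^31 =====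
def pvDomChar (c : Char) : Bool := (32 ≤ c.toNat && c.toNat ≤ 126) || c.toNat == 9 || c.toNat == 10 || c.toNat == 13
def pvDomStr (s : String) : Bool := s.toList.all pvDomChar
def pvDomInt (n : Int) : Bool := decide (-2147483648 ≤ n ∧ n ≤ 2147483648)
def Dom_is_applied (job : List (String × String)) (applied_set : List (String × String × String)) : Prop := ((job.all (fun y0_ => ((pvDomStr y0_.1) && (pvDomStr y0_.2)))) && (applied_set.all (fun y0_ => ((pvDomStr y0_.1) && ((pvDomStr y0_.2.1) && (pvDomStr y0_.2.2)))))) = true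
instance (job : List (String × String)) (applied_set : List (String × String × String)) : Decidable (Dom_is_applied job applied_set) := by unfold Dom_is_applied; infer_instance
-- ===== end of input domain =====

-- B replaces A's set lookup + branched fallbacks by one early-exit recursive scan with a uniform per-entry rule (simpler; same cost).
-- ===== PORT A =====
def pvNorm (job : List (String × String)) (k : String) : String :=
  PySem.Str.strip (PySem.Str.lower ((PySem.Dict.mk job).getD k ""))

def is_applied (job : List (String × String)) (applied_set : List (String × String × String)) : Bool :=
  let company := pvNorm job "company_name"
  let location := pvNorm job "location"
  let title := pvNorm job "job_title"
  if company == "" || title == "" then false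
  else if applied_set.contains (company, location, title) then true
  else if location == "" then
    applied_set.any (fun e => e.1 == company && e.2.2 == title)
  else applied_set.contains (company, "", title)

-- ===== PORT B =====
-- per-entry rule (port of _matches in Source B)
def pvMatches (entry : String × String × String) (company location title : String) : Bool :=
  if entry.1 != company || entry.2.2 != title then false
  else entry.2.1 == location || entry.2.1 == "" || location == ""

-- early-exit linear scan (port of Source B's for-loop)
def pvScan (entries : List (String × String × String)) (company location title : String) : Bool :=
  match entries with
  | [] => false
  | entry :: rest =>
      if pvMatches entry company location title then true
      else pvScan rest company location title

def is_applied_alt (job : List (String × String)) (applied_set : List (String × String × String)) : Bool :=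
  let company := pvNorm job "company_name"
  let location := pvNorm job "location"
  let title := pvNorm job "job_title"
  if company == "" || title == "" then false
  else pvScan applied_set company location title

-- ===== PRECONDITION & SPEC =====
def Spec_is_applied (job : List (String × String)) (applied_set : List (String × String × String)) (out : Bool) : Prop := out = is_applied_alt job applied_set
instance (job : List (String × String)) (applied_set : List (String × String × String)) (out : Bool) : Decidable (Spec_is_applied job applied_set out) := by unfold Spec_is_applied; infer_instance

-- ===== CLAIM (what is proved, stated in full; the proofs are below) =====
def Claim_equal_is_applied : Prop := ∀ (job : List (String × String)) (applied_set : List (String × String × String)), Dom_is_applied job applied_set → Spec_is_applied job applied_set (is_applied job applied_set)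

-- ===== LEMMAS AND PROOFS =====
theorem pvScan_eq_any (as : List (String × String × String)) (c loc t : String) :
    pvScan as c loc t = as.any (fun e => pvMatches e c loc t) := by
  induction as with
  | nil => rfl
  | cons e rest ih => simp [pvScan, ih]

theorem branch_eq_any (as : List (String × String × String)) (c loc t : String) :
    ((as.contains (c, loc, t) ||
       (if loc == "" then as.any (fun e => e.1 == c && e.2.2 == t)
        else as.contains (c, "", t))) =
     as.any (fun e => pvMatches e c loc t)) := by
  rw [Bool.eq_iff_iff]
  by_cases hl : loc = ""
  · subst hl
    simp [List.any_eq_true, List.contains_eq_mem, pvMatches]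
    aesop
  · simp [List.any_eq_true, List.contains_eq_mem, pvMatches, hl]
    aesop

-- ===== VERDICT (by name: the statement is the Claim_ definition above) =====
theorem is_applied_spec : Claim_equal_is_applied := by
  intro job applied_set _
  unfold Spec_is_applied is_applied is_applied_alt
  by_cases hg : (pvNorm job "company_name" == "" || pvNorm job "job_title" == "") = true
  · simp [hg]
  · simp only [Bool.not_eq_true] at hg
    simp only [hg]
    rw [pvScan_eq_any, ← branch_eq_any]
    split <;> simp_all
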